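-- pv_equiv track=rewrite | github.com/RAHUL-Keroor/Python.-internship- | Untitled-6.py | min_steps_to_magic_string
-- ===== SOURCE A (Python) =====
-- def min_steps_to_magic_string(s):
--     # Count the frequency of each character in the string
--     char_frequency = {}
--     for char in s:
--         if char in char_frequency:
--             char_frequency[char] += 1
--         else:
--             char_frequency[char] = 1
--
--     # Find the maximum frequency
--     max_frequency = max(char_frequency.values())
--
--     # Calculate the minimum number of steps required
--     min_steps = len(s) - max_frequency
--
--     return min_steps
-- ===== SOURCE B (Python) =====
-- def min_steps_to_magic_string(s):
--     # Sort the characters so equal characters become adjacent, then scan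
--     # for run lengths; the longest run is the highest character frequency.
--     t = sorted(s)
--     runs = []
--     prev = None
--     for c in t:
--         if runs and c == prev:
--             runs[-1] += 1
--         else:
--             runs.append(1)
--         prev = c
--     return len(s) - max(runs)
-- ===== Notes on version B (the rewrite author's own statement) =====
-- stated objective: alternative
-- what changed: Replaces the frequency-dict building loop and max over dict values by sorting the string and scanning the sorted characters once for run lengths, taking the longest run as the top frequency.
-- outside the precondition, e.g. on min_steps_to_magic_string(''): A raises ValueError, B raises ValueError
import Mathlib
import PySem

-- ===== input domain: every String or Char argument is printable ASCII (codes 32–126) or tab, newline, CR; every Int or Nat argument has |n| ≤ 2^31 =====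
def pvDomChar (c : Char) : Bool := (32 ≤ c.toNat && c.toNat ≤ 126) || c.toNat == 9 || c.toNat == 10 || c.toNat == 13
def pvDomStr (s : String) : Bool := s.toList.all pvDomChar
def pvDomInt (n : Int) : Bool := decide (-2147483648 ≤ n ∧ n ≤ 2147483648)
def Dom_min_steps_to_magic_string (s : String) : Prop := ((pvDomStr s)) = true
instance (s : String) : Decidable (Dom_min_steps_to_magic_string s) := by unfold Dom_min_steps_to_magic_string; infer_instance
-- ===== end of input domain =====

-- B replaces A's frequency-dict pass by sort-then-scan for the longest run of equal
-- characters (alternative decomposition; no speed claim). Both raise on the empty string.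

-- ===== PORT A =====
-- dict-counting loop, then max over the dict's values
def min_steps_to_magic_string (s : String) : Int :=
  let char_frequency := s.toList.foldl
    (fun d c => if d.contains c then d.insert c (d.getD c 0 + 1) else d.insert c 1)
    (PySem.Dict.empty : PySem.Dict Char Int)
  match PySem.List.max? char_frequency.values (fun v => v) with
  | some max_frequency => PySem.Str.len s - max_frequency
  | none => 0  -- unreachable under Pre_: Python's max([]) raises ValueError here

-- ===== PORT B =====
-- runs[-1] += 1
def pvIncLast : List Int → List Int
  | [] => []
  | [x] => [x + 1]
  | x :: y :: xs => x :: pvIncLast (y :: xs)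

-- one iteration of B's loop over the sorted characters; state = (runs, prev)
def pvRunStep (st : List Int × Option Char) (c : Char) : List Int × Option Char :=
  if st.1 ≠ [] ∧ st.2 = some c then (pvIncLast st.1, some c) else (st.1 ++ [1], some c)

def min_steps_to_magic_string_alt (s : String) : Int :=
  let t := PySem.List.sorted s.toList (fun c => c) false
  let runs := (t.foldl pvRunStep ([], none)).1
  match PySem.List.max? runs (fun v => v) with
  | some m => PySem.Str.len s - m
  | none => 0  -- unreachable under Pre_: Python's max([]) raises ValueError here

-- ===== PRECONDITION & SPEC =====
-- Pre_ excludes only the empty string, on which both Pythons raise ValueError (max of an empty sequence).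
def Pre_min_steps_to_magic_string (s : String) : Prop := s ≠ ""
instance (s : String) : Decidable (Pre_min_steps_to_magic_string s) := by unfold Pre_min_steps_to_magic_string; infer_instance
def pvWitness_min_steps_to_magic_string : String := "leetcode"

def Spec_min_steps_to_magic_string (s : String) (out : Int) : Prop := out = min_steps_to_magic_string_alt s
instance (s : String) (out : Int) : Decidable (Spec_min_steps_to_magic_string s out) := by unfold Spec_min_steps_to_magic_string; infer_instance

-- ===== CLAIM (what is proved, stated in full; the proofs are below) =====
def Claim_equal_min_steps_to_magic_string : Prop := ∀ (s : String), Dom_min_steps_to_magic_string s → Pre_min_steps_to_magic_string s → Spec_min_steps_to_magic_string s (min_steps_to_magic_string s)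

-- ===== LEMMAS AND PROOFS =====

-- A's loop body is counting: both branches are `insert c (getD c 0 + 1)`
lemma pvFoldA_eq_counter (xs : List Char) :
    xs.foldl (fun d c => if d.contains c then d.insert c (d.getD c 0 + 1) else d.insert c 1)
      (PySem.Dict.empty : PySem.Dict Char Int) = PySem.Dict.counter xs := by
  have hfun : (fun (d : PySem.Dict Char Int) c =>
      if d.contains c then d.insert c (d.getD c 0 + 1) else d.insert c 1)
      = fun d c => d.insert c (d.getD c 0 + 1) := by
    funext d c
    by_cases h : d.contains c = true
    · simp [h]
    · rw [PySem.Dict.getD_of_not_contains d (0 : Int) (by simpa using h)]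
      simp [h]
  rw [hfun, PySem.Dict.foldl_insert_getD_add_one_eq_counter]

lemma pvValues_counter (xs : List Char) :
    (PySem.Dict.counter xs : PySem.Dict Char Int).values
      = (PySem.Set.ofList xs).map (fun k => (xs.count k : Int)) := by
  show ((PySem.Dict.counter xs : PySem.Dict Char Int).items.map Prod.snd) = _
  rw [PySem.Dict.items_counter, List.map_map]
  simp [Function.comp]

lemma pvIncLast_append (rs : List Int) (k : Int) : pvIncLast (rs ++ [k]) = rs ++ [k + 1] := by
  induction rs with
  | nil => simp [pvIncLast]
  | cons x rs ih =>
    cases rs with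
    | nil => simp [pvIncLast]
    | cons y rs' => simpa [pvIncLast] using ih

lemma pvFoldl_replicate_run (n : Nat) (c : Char) : ∀ (rs : List Int) (k : Int),
    (List.replicate n c).foldl pvRunStep (rs ++ [k], some c) = (rs ++ [k + n], some c) := by
  induction n with
  | zero => intro rs k; simp
  | succ n ih =>
    intro rs k
    rw [List.replicate_succ, List.foldl_cons]
    have hstep : pvRunStep (rs ++ [k], some c) c = (rs ++ [k + 1], some c) := by
      rw [pvRunStep]
      simp [pvIncLast_append]
    rw [hstep, ih rs (k + 1)]
    have hk : k + 1 + (n : Int) = k + ((n + 1 : Nat) : Int) := by push_cast; ring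
    rw [hk]

-- in a ≤-sorted list whose elements all dominate c, dropping the leading run of c's drops every c
lemma pvNotMemDropWhile (c : Char) : ∀ (t : List Char), t.Pairwise (· ≤ ·) → (∀ y ∈ t, c ≤ y) →
    c ∉ t.dropWhile (fun x => x == c) := by
  intro t
  induction t with
  | nil => simp
  | cons y t' ih =>
    intro hpw hle
    by_cases hy : (y == c) = true
    · rw [List.dropWhile_cons, if_pos hy]
      exact ih (List.pairwise_cons.mp hpw).2 (fun z hz => hle z (List.mem_cons_of_mem _ hz))
    · rw [List.dropWhile_cons, if_neg hy]
      intro hc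
      have hyc : y ≠ c := by simpa using hy
      rcases List.mem_cons.mp hc with h | h
      · exact hyc h.symm
      · have h1 : y ≤ c := (List.pairwise_cons.mp hpw).1 c h
        have h2 : c ≤ y := hle y List.mem_cons_self
        exact hyc (le_antisymm h1 h2)

-- B's scan over a ≤-sorted list produces (a permutation of) the per-distinct-character counts
lemma pvRuns_spec : ∀ (n : Nat) (ys : List Char), ys.length ≤ n →
    ys.Pairwise (· ≤ ·) → ∀ (rs : List Int) (p : Option Char),
    (rs = [] ∨ ∀ c ∈ ys, p ≠ some c) →
    ((ys.foldl pvRunStep (rs, p)).1).Perm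
      (rs ++ (PySem.Set.ofList ys).map (fun c => (ys.count c : Int))) := by
  intro n
  induction n with
  | zero =>
    intro ys hlen _ rs p _
    have : ys = [] := List.eq_nil_of_length_eq_zero (Nat.le_zero.mp hlen)
    subst this; simp
  | succ n ih =>
    intro ys hlen hys rs p hstart
    cases ys with
    | nil => simp
    | cons c t =>
      -- split t into the run of c's and the rest
      set run := t.takeWhile (fun x => x == c) with hrunDef
      set rest := t.dropWhile (fun x => x == c) with hrestDef
      have ht : run ++ rest = t := by
        rw [hrunDef, hrestDef]; exact List.takeWhile_append_dropWhile
      have hrun : run = List.replicate run.length c := by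
        apply List.eq_replicate_length.mpr
        intro b hb
        have := List.mem_takeWhile_imp hb
        simpa using this
      have htpw : t.Pairwise (· ≤ ·) := (List.pairwise_cons.mp hys).2
      have hct : ∀ y ∈ t, c ≤ y := (List.pairwise_cons.mp hys).1
      have hrestpw : rest.Pairwise (· ≤ ·) := htpw.sublist (List.dropWhile_sublist _)
      have hcnotin : c ∉ rest := by
        rw [hrestDef]
        exact pvNotMemDropWhile c t htpw hct
      -- evaluate the first step
      have hstep : pvRunStep (rs, p) c = (rs ++ [1], some c) := by
        rw [pvRunStep]
        rcases hstart with hrs | hp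
        · simp [hrs]
        · simp [hp c List.mem_cons_self]
      -- run the fold
      have hfold : ((c :: t).foldl pvRunStep (rs, p)).1
          = (rest.foldl pvRunStep (rs ++ [1 + (run.length : Int)], some c)).1 := by
        rw [List.foldl_cons, hstep, ← ht, List.foldl_append]
        have h1 := pvFoldl_replicate_run run.length c rs 1
        rw [← hrun] at h1
        rw [h1]
      have hrestlen : rest.length ≤ n := by
        have h1 : rest.length ≤ t.length := (List.dropWhile_sublist _).length_le
        have h2 : t.length ≤ n := by simpa using Nat.succ_le_succ_iff.mp (by simpa using hlen)
        omega
      have hIH := ih rest hrestlen hrestpw (rs ++ [1 + (run.length : Int)]) (some c)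
        (Or.inr (by intro d hd heq; injection heq with h; exact hcnotin (h ▸ hd)))
      rw [hfold]
      refine hIH.trans ?_
      rw [List.append_assoc]
      apply List.Perm.append_left
      -- now: (1 + run.length) :: counts of rest  ~  counts of (c :: t)
      have hsetperm : (PySem.Set.ofList (c :: t)).Perm (c :: PySem.Set.ofList rest) := by
        apply (List.perm_ext_iff_of_nodup (PySem.Set.nodup_ofList _) ?_).mpr
        · intro x
          rw [PySem.Set.mem_ofList]
          constructor
          · intro hx
            rcases List.mem_cons.mp hx with hxc | hxt
            · exact hxc ▸ List.mem_cons_self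
            · rw [← ht] at hxt
              rcases List.mem_append.mp hxt with hxr | hxrest
              · have : x = c := by
                  have := List.mem_takeWhile_imp hxr
                  simpa using this
                exact this ▸ List.mem_cons_self
              · exact List.mem_cons_of_mem _ ((PySem.Set.mem_ofList _ _).mpr hxrest)
          · intro hx
            rcases List.mem_cons.mp hx with hxc | hxr
            · exact hxc ▸ List.mem_cons_self
            · exact List.mem_cons_of_mem _ (by
                rw [← ht]
                exact List.mem_append_right _ ((PySem.Set.mem_ofList _ _).mp hxr))
        · exact List.nodup_cons.mpr ⟨fun hc => hcnotin ((PySem.Set.mem_ofList _ _).mp hc),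
            PySem.Set.nodup_ofList _⟩
      have hcr : run.count c = run.length := by
        rw [hrun]; simp
      have hcount_c : ((c :: t).count c : Int) = 1 + (run.length : Int) := by
        rw [List.count_cons_self, ← ht, List.count_append, hcr,
          List.count_eq_zero_of_not_mem hcnotin]
        push_cast
        ring
      have hcount_rest : ∀ d ∈ PySem.Set.ofList rest,
          ((c :: t).count d : Int) = (rest.count d : Int) := by
        intro d hd
        have hdr : d ∈ rest := (PySem.Set.mem_ofList _ _).mp hd
        have hdc : d ≠ c := fun h => hcnotin (h ▸ hdr)
        have hcd : c ≠ d := Ne.symm hdc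
        have hrc : run.count d = 0 := by
          rw [hrun]
          simp [List.count_replicate, hcd]
        rw [← ht]
        simp [List.count_append, hrc, hcd]
      have hmapeq : (1 + (run.length : Int)) :: (PySem.Set.ofList rest).map (fun c => (rest.count c : Int))
          = (c :: PySem.Set.ofList rest).map (fun d => ((c :: t).count d : Int)) := by
        rw [List.map_cons, hcount_c]
        congr 1
        exact (List.map_congr_left hcount_rest).symm
      rw [List.singleton_append, hmapeq]
      exact (hsetperm.map _).symm

-- max(xs) (no key) takes the same value on permuted lists
lemma pvMax?_eq_of_perm {l₁ l₂ : List Int} (h : l₁.Perm l₂) :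
    PySem.List.max? l₁ (fun v => v) = PySem.List.max? l₂ (fun v => v) := by
  cases h1 : PySem.List.max? l₁ (fun v => v) with
  | none =>
    have h1' : l₁ = [] := (PySem.List.max?_eq_none_iff _ _).mp h1
    subst h1'
    have h2' : l₂ = [] := h.symm.eq_nil
    subst h2'
    rfl
  | some m₁ =>
    cases h2 : PySem.List.max? l₂ (fun v => v) with
    | none =>
      have h2' : l₂ = [] := (PySem.List.max?_eq_none_iff _ _).mp h2
      subst h2'
      have h1' : l₁ = [] := h.eq_nil
      subst h1'
      simp [PySem.List.max?] at h1
    | some m₂ =>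
      have hm1 : m₁ ∈ l₂ := h.mem_iff.mp (PySem.List.max?_mem h1)
      have hm2 : m₂ ∈ l₁ := h.mem_iff.mpr (PySem.List.max?_mem h2)
      have h12 : m₁ ≤ m₂ := PySem.List.max?_isMax h2 m₁ hm1
      have h21 : m₂ ≤ m₁ := PySem.List.max?_isMax h1 m₂ hm2
      rw [le_antisymm h12 h21]

-- the two count lists (A: input order, B: sorted order) are permutations of each other
lemma pvCounts_perm (xs : List Char) :
    ((PySem.Set.ofList xs).map (fun k => (xs.count k : Int))).Perm
      ((PySem.Set.ofList (PySem.List.sorted xs (fun c => c) false)).map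
        (fun c => ((PySem.List.sorted xs (fun c => c) false).count c : Int))) := by
  set ys := PySem.List.sorted xs (fun c => c) false with hys
  have hperm : ys.Perm xs := PySem.List.sorted_perm xs (fun c => c) false
  have hset : (PySem.Set.ofList xs).Perm (PySem.Set.ofList ys) := by
    apply (List.perm_ext_iff_of_nodup (PySem.Set.nodup_ofList _) (PySem.Set.nodup_ofList _)).mpr
    intro x
    rw [PySem.Set.mem_ofList, PySem.Set.mem_ofList]
    exact hperm.mem_iff.symm
  refine (hset.map _).trans ?_
  have : ∀ d ∈ PySem.Set.ofList ys, (xs.count d : Int) = (ys.count d : Int) := by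
    intro d _
    rw [hperm.count_eq]
  rw [List.map_congr_left this]

-- ===== VERDICT (by name: the statement is the Claim_ definition above) =====
theorem min_steps_to_magic_string_spec : Claim_equal_min_steps_to_magic_string := by
  intro s _ hpre
  unfold Spec_min_steps_to_magic_string min_steps_to_magic_string min_steps_to_magic_string_alt
  simp only [pvFoldA_eq_counter, pvValues_counter]
  set ys := PySem.List.sorted s.toList (fun c => c) false with hys
  have hruns : ((ys.foldl pvRunStep ([], none)).1).Perm
      ((PySem.Set.ofList ys).map (fun c => (ys.count c : Int))) := by
    simpa using pvRuns_spec ys.length ys le_rfl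
      (by simpa using PySem.List.sorted_pairwise s.toList (fun c => c)) [] none (Or.inl rfl)
  have hperm : ((PySem.Set.ofList s.toList).map (fun k => (s.toList.count k : Int))).Perm
      ((ys.foldl pvRunStep ([], none)).1) := (pvCounts_perm s.toList).trans hruns.symm
  rw [pvMax?_eq_of_perm hperm]
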